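-- pv_equiv track=rewrite | github.com/hansmaulwurf23/aoc | 2016/day 25/d25.py | run_fast
-- ===== SOURCE A (Python) =====
-- def run_fast(initial_a, max_out):
--     outs = []
--     a = initial_a
--     d = a + 182 * 14
--     while True:
--         a = d
--         first = True
--         while first or a:
--             first = False
--             b = a
--             a = 0
--             c = 2
--             while b:
--                 b -= 1
--                 c -= 1
--                 if not c:
--                     a += 1
--                     c = 2
--
--             b = 2
--             while c:
--                 b -= 1
--                 c -= 1
--
--             # NOOP[27]
--             outs.append(b)
--             if len(outs) >= 2 and outs[-1] == outs[-2]: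
--                 return outs
--             if len(outs) == max_out:
--                 return outs
-- ===== SOURCE B (Python) =====
-- def run_fast(initial_a, max_out):
--     d = initial_a + 2548
--     bits = []
--     a = d
--     first = True
--     while first or a:
--         first = False
--         bits.append(a & 1)
--         a >>= 1
--     outs = []
--     i = 0
--     while True:
--         outs.append(bits[i % len(bits)])
--         if len(outs) >= 2 and outs[-1] == outs[-2]:
--             return outs
--         if len(outs) == max_out:
--             return outs
--         i += 1
-- ===== Notes on version B (the rewrite author's own statement) =====
-- stated objective: faster
-- what changed: B computes the LSB-first binary digit list of d = initial_a + 2548 once by direct halving arithmetic and then emits it cyclically by index with the same two stop rules, instead of A's re-deriving every digit with unary counting loops that decrement b one step at a time.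
import Mathlib
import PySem

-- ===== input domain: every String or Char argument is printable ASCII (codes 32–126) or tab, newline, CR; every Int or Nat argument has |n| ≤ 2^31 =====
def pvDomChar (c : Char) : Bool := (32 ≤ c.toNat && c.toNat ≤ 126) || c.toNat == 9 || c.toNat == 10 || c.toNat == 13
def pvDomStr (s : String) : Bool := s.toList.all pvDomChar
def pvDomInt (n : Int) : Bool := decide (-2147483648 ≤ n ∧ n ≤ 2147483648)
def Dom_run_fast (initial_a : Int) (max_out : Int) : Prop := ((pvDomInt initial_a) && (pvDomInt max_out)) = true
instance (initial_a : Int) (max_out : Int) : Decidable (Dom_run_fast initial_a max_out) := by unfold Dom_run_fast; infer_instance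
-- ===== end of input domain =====

-- B builds the LSB-first binary digit list of initial_a+2548 once with direct arithmetic and then
-- emits it cyclically by index, instead of A's per-pass unary counting loops that re-derive each digit.


-- ===== PORT A =====
-- 'b = a; a = 0; c = 2; while b: b -= 1; c -= 1; if not c: a += 1; c = 2'
-- fuel = b.toNat (exact iteration count for b ≥ 0; for b < 0 the Python loop never terminates, excluded by Pre_)
def loopB_A : Nat → Int → Int → Int → Int × Int
  | 0, _, a, c => (a, c)
  | fuel+1, b, a, c =>
      if b ≠ 0 then
        if c - 1 = 0 then loopB_A fuel (b - 1) (a + 1) 2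
        else loopB_A fuel (b - 1) a (c - 1)
      else (a, c)

-- 'b = 2; while c: b -= 1; c -= 1'  ; fuel = c.toNat (exact for c ≥ 0; here c is always 1 or 2)
def loopC_A : Nat → Int → Int → Int
  | 0, b, _ => b
  | fuel+1, b, c => if c ≠ 0 then loopC_A fuel (b - 1) (c - 1) else b

-- A's outer 'while True' and inner 'while first or a': one fuel step per append; when the inner
-- condition 'first or a' fails, the outer loop sets a := d, first := True and the inner loop is
-- re-entered at once with a true condition, which is folded into the same step (a1 below).
def goA : Nat → Int → Int → Bool → List Int → Int → List Int
  | 0, _, _, _, outs, _ => outs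
  | fuel+1, a, d, first, outs, max_out =>
      let a1 : Int := if first ∨ a ≠ 0 then a else d
      let bc := loopB_A a1.toNat a1 0 2
      let b := loopC_A bc.2.toNat 2 bc.2
      let outs' := outs ++ [b]
      if 2 ≤ outs'.length ∧ PySem.List.pyGet? outs' (-1) = PySem.List.pyGet? outs' (-2) then outs'
      else if (outs'.length : Int) = max_out then outs'
      else goA fuel bc.1 d false outs' max_out

-- fuel: under Pre_ the Python appends at most max(max_out, bitlength+1) ≤ max_out.toNat + 80 times on Dom
def run_fast (initial_a : Int) (max_out : Int) : List Int :=
  let d := initial_a + 182 * 14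
  goA (max_out.toNat + 80) d d true [] max_out

-- ===== PORT B =====
-- 'first = True; while first or a: first = False; bits.append(a & 1); a >>= 1'
-- fuel = a.toNat + 1 (exact for a ≥ 0; for a < 0 the Python loop never terminates, excluded by Pre_)
def bitsLoop_B : Nat → Int → Bool → List Int → List Int
  | 0, _, _, bits => bits
  | fuel+1, a, first, bits =>
      if first ∨ a ≠ 0 then
        bitsLoop_B fuel (PySem.Int.floordiv a 2) false (bits ++ [PySem.Int.mod a 2])
      else bits

-- 'while True: outs.append(bits[i % len(bits)]); <the two stop checks>; i += 1'
-- bits[i % len(bits)] is always in range (bits is nonempty, 0 ≤ i % len < len), so .getD 0 is exact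
def emitB : Nat → List Int → Int → List Int → Int → List Int
  | 0, _, _, outs, _ => outs
  | fuel+1, bits, i, outs, max_out =>
      let b := (PySem.List.pyGet? bits (PySem.Int.mod i (bits.length : Int))).getD 0
      let outs' := outs ++ [b]
      if 2 ≤ outs'.length ∧ PySem.List.pyGet? outs' (-1) = PySem.List.pyGet? outs' (-2) then outs'
      else if (outs'.length : Int) = max_out then outs'
      else emitB fuel bits (i + 1) outs' max_out

def run_fast_alt (initial_a : Int) (max_out : Int) : List Int :=
  let d := initial_a + 2548
  let bits := bitsLoop_B (d.toNat + 1) d true []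
  emitB (max_out.toNat + 80) bits 0 [] max_out

-- ===== PRECONDITION & SPEC =====
-- altAux n n decides whether n's binary digits are the cyclically alternating pattern 10, 1010, 101010, …
-- (n ∈ {2, 10, 42, 170, …}); fuel n bounds the recursion depth (log₄ n)
def altAux : Nat → Nat → Bool
  | 0, _ => false
  | fuel+1, n => if n = 2 then true else if n % 4 = 2 then altAux fuel (n / 4) else false

-- Pre_ excludes exactly the inputs on which Python A never returns (it loops forever): d = initial_a + 2548
-- negative (the innermost counting loop cannot reach 0), or max_out ≤ 0 while d's binary digits alternate
-- cyclically, so neither stop rule ever fires.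
def Pre_run_fast (initial_a : Int) (max_out : Int) : Prop :=
  0 ≤ initial_a + 2548 ∧
    (1 ≤ max_out ∨ altAux (initial_a + 2548).toNat (initial_a + 2548).toNat = false)
instance (initial_a : Int) (max_out : Int) : Decidable (Pre_run_fast initial_a max_out) := by
  unfold Pre_run_fast; infer_instance

def pvWitness_run_fast : Int × Int := (0, 10)

def Spec_run_fast (initial_a : Int) (max_out : Int) (out : List Int) : Prop := out = run_fast_alt initial_a max_out
instance (initial_a : Int) (max_out : Int) (out : List Int) : Decidable (Spec_run_fast initial_a max_out out) := by unfold Spec_run_fast; infer_instance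

-- ===== CLAIM (what is proved, stated in full; the proofs are below) =====
def Claim_equal_run_fast : Prop := ∀ (initial_a : Int) (max_out : Int), Dom_run_fast initial_a max_out → Pre_run_fast initial_a max_out → Spec_run_fast initial_a max_out (run_fast initial_a max_out)

-- ===== LEMMAS AND PROOFS =====

-- the LSB-first binary digit list of n (one digit for n = 0), the mathematical value of B's bits loop
def natBits (n : Nat) : List Int :=
  ((n % 2 : Nat) : Int) :: (if h : n / 2 = 0 then [] else natBits (n / 2))
termination_by n
decreasing_by omega

lemma loopB_char : ∀ (m : Nat) (acc c : Int), c = 1 ∨ c = 2 →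
    loopB_A m (m : Int) acc c =
      (acc + ((m : Int) + (2 - c)) / 2, 2 - ((m : Int) + (2 - c)) % 2) := by
  intro m
  induction m with
  | zero =>
      intro acc c hc
      rcases hc with h | h <;> subst h <;>
        simp only [loopB_A, Nat.cast_zero] <;>
        refine Prod.ext ?_ ?_ <;> simp <;> (try omega)
  | succ k ih =>
      intro acc c hc
      have hbne : ((k + 1 : Nat) : Int) ≠ 0 := by push_cast; omega
      have hb1 : ((k + 1 : Nat) : Int) - 1 = (k : Int) := by push_cast; ring
      rcases hc with h | h <;> subst h
      · have e1 : loopB_A (k + 1) ((k + 1 : Nat) : Int) acc 1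
            = loopB_A k (((k + 1 : Nat) : Int) - 1) (acc + 1) 2 := by
          simp only [loopB_A]
          rw [if_pos hbne, if_pos (by norm_num : (1 : Int) - 1 = 0)]
        rw [e1, hb1, ih (acc + 1) 2 (Or.inr rfl)]
        refine Prod.ext ?_ ?_ <;> simp <;> (try push_cast) <;> (try omega)
      · have e2 : loopB_A (k + 1) ((k + 1 : Nat) : Int) acc 2
            = loopB_A k (((k + 1 : Nat) : Int) - 1) acc 1 := by
          simp only [loopB_A]
          rw [if_pos hbne, if_neg (by norm_num : ¬((2 : Int) - 1 = 0))]
          norm_num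
        rw [e2, hb1, ih acc 1 (Or.inl rfl)]
        refine Prod.ext ?_ ?_ <;> simp <;> (try push_cast) <;> (try omega)

lemma passA (m : Nat) :
    loopB_A ((m : Int)).toNat (m : Int) 0 2 = (((m / 2 : Nat) : Int), 2 - ((m % 2 : Nat) : Int)) := by
  rw [Int.toNat_natCast, loopB_char m 0 2 (Or.inr rfl)]
  refine Prod.ext ?_ ?_ <;> simp <;> (try push_cast) <;> (try omega)

lemma passBit (m : Nat) :
    loopC_A (2 - ((m % 2 : Nat) : Int)).toNat 2 (2 - ((m % 2 : Nat) : Int)) = ((m % 2 : Nat) : Int) := by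
  rcases Nat.mod_two_eq_zero_or_one m with h | h <;> rw [h] <;> decide

lemma natBits_length_pos (n : Nat) : 0 < (natBits n).length := by
  rw [natBits.eq_def]; simp

lemma natBits_get? (n : Nat) : ∀ j, j < (natBits n).length →
    (natBits n)[j]? = some (((n / 2 ^ j % 2 : Nat) : Int)) := by
  induction n using Nat.strong_induction_on with
  | _ n ih =>
    intro j h
    rw [natBits.eq_def] at h ⊢
    match j with
    | 0 => simp
    | j + 1 =>
      by_cases h2 : n / 2 = 0
      · simp [h2] at h
      · simp only [h2, dite_false, List.length_cons] at h
        simp only [h2, dite_false, List.getElem?_cons_succ]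
        rw [ih (n / 2) (by omega) j (by omega)]
        have hd : n / 2 / 2 ^ j = n / 2 ^ (j + 1) := by
          rw [Nat.div_div_eq_div_mul, ← pow_succ']
        rw [hd]

lemma natBits_shift_len (n : Nat) : n / 2 ^ (natBits n).length = 0 := by
  induction n using Nat.strong_induction_on with
  | _ n ih =>
    rw [natBits.eq_def]
    by_cases h2 : n / 2 = 0
    · simp only [h2, dite_true, List.length_cons, List.length_nil]
      omega
    · simp only [h2, dite_false, List.length_cons]
      have := ih (n / 2) (by omega)
      rw [pow_succ', ← Nat.div_div_eq_div_mul]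
      exact this

lemma natBits_shift_pos (n : Nat) : ∀ j, j < (natBits n).length → 0 < j → n / 2 ^ j ≠ 0 := by
  induction n using Nat.strong_induction_on with
  | _ n ih =>
    intro j hj hpos
    rw [natBits.eq_def] at hj
    by_cases h2 : n / 2 = 0
    · simp [h2] at hj; omega
    · simp only [h2, dite_false, List.length_cons] at hj
      match j, hpos with
      | j + 1, _ =>
        rw [pow_succ', ← Nat.div_div_eq_div_mul]
        rcases Nat.eq_zero_or_pos j with rfl | hj0
        · simpa using h2
        · exact ih (n / 2) (by omega) j (by omega) hj0

lemma bitsLoop_done (fuel : Nat) (acc : List Int) : bitsLoop_B fuel 0 false acc = acc := by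
  cases fuel <;> simp [bitsLoop_B]

lemma bitsLoop_first : ∀ (fuel : Nat) (a : Int) (acc : List Int), a ≠ 0 →
    bitsLoop_B fuel a false acc = bitsLoop_B fuel a true acc := by
  intro fuel a acc ha
  cases fuel <;> simp [bitsLoop_B, ha]

lemma bitsLoop_char : ∀ (fuel : Nat) (m : Nat) (acc : List Int), m < fuel →
    bitsLoop_B fuel (m : Int) true acc = acc ++ natBits m := by
  intro fuel
  induction fuel with
  | zero => intro m acc h; omega
  | succ f ih =>
    intro m acc h
    have hdiv : PySem.Int.floordiv (m : Int) 2 = ((m / 2 : Nat) : Int) := by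
      exact_mod_cast PySem.Int.floordiv_natCast m 2
    have hmod : PySem.Int.mod (m : Int) 2 = ((m % 2 : Nat) : Int) := by
      exact_mod_cast PySem.Int.mod_natCast m 2
    simp only [bitsLoop_B, true_or, if_true, hdiv, hmod]
    by_cases h2 : m / 2 = 0
    · rw [h2, Int.natCast_zero, bitsLoop_done]
      conv_rhs => rw [natBits.eq_def]
      simp [h2]
    · rw [bitsLoop_first f _ _ (by exact_mod_cast h2),
          ih (m / 2) (acc ++ [((m % 2 : Nat) : Int)]) (by omega)]
      conv_rhs => rw [natBits.eq_def]
      simp [h2]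

lemma succ_mod (i L : Nat) : (i + 1) % L = (i % L + 1) % L := by
  rcases Nat.eq_zero_or_pos L with rfl | hL
  · simp
  · have hdm := Nat.div_add_mod i L
    conv_lhs => rw [show i + 1 = L * (i / L) + (i % L + 1) by omega]
    rw [Nat.mul_add_mod]

-- lockstep: A's per-pass state (a, first) tracks B's cyclic index i through d's digit list
lemma lockstep (n : Nat) (max_out : Int) :
    ∀ (fuel : Nat) (i : Nat) (outs : List Int) (a : Int) (first : Bool),
      ((first = true ∧ i % (natBits n).length = 0 ∧ a = (n : Int)) ∨
       (first = false ∧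
         a = ((n / 2 ^ (if i % (natBits n).length = 0 then (natBits n).length
                        else i % (natBits n).length) : Nat) : Int))) →
      goA fuel a (n : Int) first outs max_out = emitB fuel (natBits n) (i : Int) outs max_out := by
  intro fuel
  induction fuel with
  | zero => intro i outs a first _; rfl
  | succ f ih =>
    intro i outs a first hrel
    have hLpos : 0 < (natBits n).length := natBits_length_pos n
    have hjL : i % (natBits n).length < (natBits n).length := Nat.mod_lt _ hLpos
    -- the merged reset: in every admitted state the pass starts from a1 = n / 2^(i % L)
    have ha1 : (if first ∨ a ≠ 0 then a else (n : Int))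
        = ((n / 2 ^ (i % (natBits n).length) : Nat) : Int) := by
      rcases hrel with ⟨hf, hj0, ha⟩ | ⟨hf, ha⟩
      · rw [if_pos (Or.inl (by simp [hf])), ha, hj0]
        simp
      · subst hf
        by_cases hj0 : i % (natBits n).length = 0
        · simp only [hj0, if_pos] at ha
          rw [natBits_shift_len n] at ha
          norm_num at ha
          rw [if_neg (by simp [ha]), hj0]
          simp
        · rw [if_neg hj0] at ha
          have hne : (n / 2 ^ (i % (natBits n).length) : Nat) ≠ 0 :=
            natBits_shift_pos n _ hjL (Nat.pos_of_ne_zero hj0)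
          rw [if_pos (Or.inr (by rw [ha]; exact_mod_cast hne)), ha]
    -- B's bit is the same digit
    have hbit : ((PySem.List.pyGet? (natBits n)
          (PySem.Int.mod (i : Int) (((natBits n).length : Nat) : Int))).getD 0)
        = ((n / 2 ^ (i % (natBits n).length) % 2 : Nat) : Int) := by
      have hmod : PySem.Int.mod (i : Int) (((natBits n).length : Nat) : Int)
          = ((i % (natBits n).length : Nat) : Int) := by
        exact_mod_cast PySem.Int.mod_natCast i ((natBits n).length)
      rw [hmod, PySem.List.pyGet?_natCast, natBits_get? n _ hjL]
      rfl
    rw [goA, emitB]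
    simp only [ha1, hbit, passA, passBit]
    by_cases hstop : 2 ≤ (outs ++ [((n / 2 ^ (i % (natBits n).length) % 2 : Nat) : Int)]).length ∧
        PySem.List.pyGet? (outs ++ [((n / 2 ^ (i % (natBits n).length) % 2 : Nat) : Int)]) (-1)
          = PySem.List.pyGet? (outs ++ [((n / 2 ^ (i % (natBits n).length) % 2 : Nat) : Int)]) (-2)
    · rw [if_pos hstop, if_pos hstop]
    · rw [if_neg hstop, if_neg hstop]
      by_cases hmax : (((outs ++ [((n / 2 ^ (i % (natBits n).length) % 2 : Nat) : Int)]).length : Nat) : Int) = max_out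
      · rw [if_pos hmax, if_pos hmax]
      · rw [if_neg hmax, if_neg hmax]
        have hIi : (i : Int) + 1 = ((i + 1 : Nat) : Int) := by push_cast; ring
        rw [hIi]
        apply ih (i + 1)
        right
        refine ⟨rfl, ?_⟩
        have hd : n / 2 ^ (i % (natBits n).length) / 2 = n / 2 ^ (i % (natBits n).length + 1) := by
          rw [Nat.div_div_eq_div_mul, ← pow_succ]
        rw [hd]
        rw [succ_mod] at *
        by_cases hw : (i % (natBits n).length + 1) % (natBits n).length = 0
        · rw [if_pos hw]
          have hjw : i % (natBits n).length + 1 = (natBits n).length := by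
            by_cases hlt : i % (natBits n).length + 1 < (natBits n).length
            · rw [Nat.mod_eq_of_lt hlt] at hw
              omega
            · omega
          rw [hjw]
        · rw [if_neg hw]
          have hjw : (i % (natBits n).length + 1) % (natBits n).length
              = i % (natBits n).length + 1 := by
            apply Nat.mod_eq_of_lt
            by_cases hlt : i % (natBits n).length + 1 < (natBits n).length
            · exact hlt
            · exfalso
              have : i % (natBits n).length + 1 = (natBits n).length := by omega
              rw [this, Nat.mod_self] at hw
              exact hw rfl
          rw [hjw]

-- ===== VERDICT (by name: the statement is the Claim_ definition above) =====
theorem run_fast_spec : Claim_equal_run_fast := by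
  intro initial_a max_out _ hpre
  obtain ⟨hd, -⟩ := hpre
  obtain ⟨n, hn⟩ : ∃ n : Nat, initial_a + 2548 = (n : Int) :=
    ⟨(initial_a + 2548).toNat, (Int.toNat_of_nonneg hd).symm⟩
  simp only [Spec_run_fast, run_fast, run_fast_alt,
    show (182 : Int) * 14 = 2548 from by norm_num, hn, Int.toNat_natCast]
  rw [bitsLoop_char (n + 1) n [] (by omega), List.nil_append]
  have hl := lockstep n max_out (max_out.toNat + 80) 0 [] (n : Int) true
    (Or.inl ⟨rfl, Nat.zero_mod _, rfl⟩)
  simpa using hl
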